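-- pv_equiv track=rewrite | github.com/llindoy/pyttn | examples/dissipative_spin_models/cayley_tree/cayley_helper.py | get_nskip
-- ===== SOURCE A (Python) =====
-- def get_nskip(Nl, d=3):
--     ret = 0
--     for i in range(Nl):
--         if i == 0:
--             ret += 1
--         else:
--             ret += d*(d-1)**(i-1)
--     return ret
-- ===== SOURCE B (Python) =====
-- def get_nskip(Nl, d=3):
--     # closed-form geometric sum over the Cayley-tree shells (O(log Nl) via pow)
--     if Nl <= 0:
--         return 0
--     if d == 2:
--         return 2 * Nl - 1
--     return 1 + d * ((d - 1) ** (Nl - 1) - 1) // (d - 2)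
-- ===== Notes on version B (the rewrite author's own statement) =====
-- stated objective: faster
-- what changed: Replaced the O(Nl) accumulation loop with the closed-form geometric-series formula 1 + d*((d-1)**(Nl-1)-1)//(d-2) using one fast exponentiation, special-casing d=2 (ratio 1) as 2*Nl-1.
import Mathlib
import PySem

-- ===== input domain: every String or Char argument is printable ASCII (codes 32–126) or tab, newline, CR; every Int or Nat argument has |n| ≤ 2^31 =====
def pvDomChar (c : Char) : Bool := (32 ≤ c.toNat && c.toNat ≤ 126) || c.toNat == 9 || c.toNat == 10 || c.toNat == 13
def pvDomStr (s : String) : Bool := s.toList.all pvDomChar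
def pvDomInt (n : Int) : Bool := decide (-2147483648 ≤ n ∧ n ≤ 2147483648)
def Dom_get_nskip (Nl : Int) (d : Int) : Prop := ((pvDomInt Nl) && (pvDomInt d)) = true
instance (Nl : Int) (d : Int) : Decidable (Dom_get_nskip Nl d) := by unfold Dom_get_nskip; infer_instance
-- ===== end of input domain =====

-- B replaces A's O(Nl) accumulation loop by the closed-form geometric sum (d=2 special-cased); objective: faster.

-- ===== PORT A =====
-- the loop body: in the else branch i ≥ 1, so the Python exponent i-1 is ≥ 0 and .toNat is exact
def get_nskip (Nl : Int) (d : Int) : Int :=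
  (PySem.List.pyRange 0 Nl 1).foldl
    (fun ret i => if i = 0 then ret + 1 else ret + d * (d - 1) ^ ((i - 1).toNat)) 0

-- ===== PORT B =====
-- closed form; in the last branch Nl ≥ 1, so the Python exponent Nl-1 is ≥ 0 and .toNat is exact
def get_nskip_alt (Nl : Int) (d : Int) : Int :=
  if Nl ≤ 0 then 0
  else if d = 2 then 2 * Nl - 1
  else 1 + PySem.Int.floordiv (d * ((d - 1) ^ ((Nl - 1).toNat) - 1)) (d - 2)

-- ===== PRECONDITION & SPEC =====
def Spec_get_nskip (Nl : Int) (d : Int) (out : Int) : Prop := out = get_nskip_alt Nl d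
instance (Nl : Int) (d : Int) (out : Int) : Decidable (Spec_get_nskip Nl d out) := by unfold Spec_get_nskip; infer_instance

-- ===== CLAIM (what is proved, stated in full; the proofs are below) =====
def Claim_equal_get_nskip : Prop := ∀ (Nl : Int) (d : Int), Dom_get_nskip Nl d → Spec_get_nskip Nl d (get_nskip Nl d)

-- ===== LEMMAS AND PROOFS =====

-- A's fold over range n (n ≥ 1) equals 1 + d * (geometric sum of d-1 up to n-1 terms)
lemma fold_closed (d : Int) : ∀ n : Nat, 1 ≤ n →
    (PySem.List.pyRange 0 (n : Int) 1).foldl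
      (fun ret i => if i = 0 then ret + 1 else ret + d * (d - 1) ^ ((i - 1).toNat)) 0
      = 1 + d * ∑ k ∈ Finset.range (n - 1), (d - 1) ^ k := by
  intro n hn
  induction n with
  | zero => omega
  | succ m ih =>
    rcases Nat.eq_zero_or_pos m with hm | hm
    · subst hm
      have h1 : PySem.List.pyRange 0 ((0 + 1 : Nat) : Int) 1 = [0] := by decide
      rw [h1]; simp
    · have hcast : (((m + 1 : Nat)) : Int) = ((m : Int)) + 1 := by push_cast; ring
      rw [hcast, PySem.List.pyRange_one_succ_right (show (0:Int) ≤ (m:Int) by exact_mod_cast Nat.zero_le m),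
        List.foldl_append, ih hm]
      have hmne : ((m : Int)) ≠ 0 := by
        simp only [ne_eq, Int.natCast_eq_zero]; omega
      have htn : (((m : Int)) - 1).toNat = m - 1 := by omega
      simp only [List.foldl, if_neg hmne, htn]
      have hm' : m = (m - 1) + 1 := by omega
      have hsum : ∑ k ∈ Finset.range m, (d - 1) ^ k
          = (∑ k ∈ Finset.range (m - 1), (d - 1) ^ k) + (d - 1) ^ (m - 1) := by
        conv_lhs => rw [hm']
        rw [Finset.sum_range_succ]
      simp only [Nat.add_sub_cancel]
      rw [hsum]; ring

-- exact floor division: (q*b) // b = q for b ≠ 0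
lemma floordiv_mul_cancel (q b : Int) (hb : b ≠ 0) : PySem.Int.floordiv (q * b) b = q := by
  have h1 := PySem.Int.floordiv_mul_add_mod (q * b) b
  have h2 : PySem.Int.mod (q * b) b = 0 :=
    (PySem.Int.mod_eq_zero_iff_dvd _ _).mpr ⟨q, mul_comm q b⟩
  rw [h2, add_zero] at h1
  have := mul_right_cancel₀ hb h1
  exact this

theorem get_nskip_spec : Claim_equal_get_nskip := by
  intro Nl d _
  unfold Spec_get_nskip get_nskip get_nskip_alt
  by_cases hNl : Nl ≤ 0
  · rw [if_pos hNl, PySem.List.pyRange_one_eq_nil hNl]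
    rfl
  · rw [if_neg hNl]
    have h1 : (1 : Int) ≤ Nl := by omega
    have hn1 : 1 ≤ Nl.toNat := by omega
    have hcast : ((Nl.toNat : Nat) : Int) = Nl := by omega
    rw [← hcast, fold_closed d Nl.toNat hn1]
    have hexp : ((Nl.toNat : Int) - 1).toNat = Nl.toNat - 1 := by omega
    rw [hexp]
    by_cases hd : d = 2
    · rw [if_pos hd, hd]
      simp only [show (2 : Int) - 1 = 1 from rfl, one_pow, Finset.sum_const,
        Finset.card_range, nsmul_eq_mul, mul_one]
      omega
    · rw [if_neg hd]
      have hgeom := geom_sum_mul (d - 1) (Nl.toNat - 1)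
      have hkey : d * ((d - 1) ^ (Nl.toNat - 1) - 1)
          = (d * ∑ k ∈ Finset.range (Nl.toNat - 1), (d - 1) ^ k) * (d - 2) := by
        have h2 : (d - 1) - 1 = d - 2 := by ring
        rw [← hgeom, h2]; ring
      rw [hkey, floordiv_mul_cancel _ _ (by omega)]
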